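-- pv_equiv track=rewrite | github.com/gosunman/Algorithm_history | Coding_Test/Delivery_Heros/3.py | solution
-- ===== SOURCE A (Python) =====
-- def solution(S):
--     N = len(S)
--     count = 0
--     a = 0
--     possible = True
--     for index in range(N):
--         if S[index] == 'a':
--             a += 1
--             if a == 3:
--                 return -1
--         else:
--             count += 2-a
--             a = 0
--     count += 2-a
--     return count
-- ===== SOURCE B (Python) =====
-- def solution(S):
--     # closed form: -1 iff S contains a run of three 'a's; otherwise each non-'a' char
--     # contributes 2 minus its preceding 'a'-run, which telescopes to the formula below
--     if 'aaa' in S: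
--         return -1
--     return 2 * len(S) - 3 * sum(c == 'a' for c in S) + 2
-- ===== Notes on version B (the rewrite author's own statement) =====
-- stated objective: simpler
-- what changed: Replaced the stateful character loop (running 'a'-run counter with per-character accumulator updates) by a substring check for 'aaa' plus a closed-form arithmetic expression 2*len(S) - 3*(number of 'a's) + 2, to which A's accumulator provably telescopes.
import Mathlib
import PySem

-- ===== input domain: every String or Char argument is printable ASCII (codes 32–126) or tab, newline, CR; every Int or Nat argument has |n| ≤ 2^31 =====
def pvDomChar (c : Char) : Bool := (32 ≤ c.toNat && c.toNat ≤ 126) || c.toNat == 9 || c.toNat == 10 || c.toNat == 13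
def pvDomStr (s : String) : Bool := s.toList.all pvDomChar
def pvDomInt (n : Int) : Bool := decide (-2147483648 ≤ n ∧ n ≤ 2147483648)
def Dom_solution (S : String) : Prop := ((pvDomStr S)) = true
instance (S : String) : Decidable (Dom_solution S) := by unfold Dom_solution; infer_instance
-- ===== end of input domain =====

-- B replaces A's stateful run-counting loop by a substring test plus a closed-form formula (objective: simpler).

-- ===== PORT A =====
-- loop over the characters of S carrying (count, a); early return -1 when a run of 'a's reaches 3
def solutionLoop : List Char → Int → Int → Int
  | [], count, a => count + (2 - a)
  | c :: rest, count, a =>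
    if c = 'a' then
      if a + 1 = 3 then -1
      else solutionLoop rest count (a + 1)
    else solutionLoop rest (count + (2 - a)) 0

def solution (S : String) : Int := solutionLoop S.toList 0 0

-- ===== PORT B =====
def solution_alt (S : String) : Int :=
  if PySem.Str.isIn "aaa" S then -1
  else 2 * (S.toList.length : Int)
       - 3 * (S.toList.foldl (fun n c => if c == 'a' then n + 1 else n) (0 : Int)) + 2

-- ===== PRECONDITION & SPEC =====
def Spec_solution (S : String) (out : Int) : Prop := out = solution_alt S
instance (S : String) (out : Int) : Decidable (Spec_solution S out) := by unfold Spec_solution; infer_instance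

-- ===== CLAIM (what is proved, stated in full; the proofs are below) =====
def Claim_equal_solution : Prop := ∀ (S : String), Dom_solution S → Spec_solution S (solution S)

-- ===== LEMMAS AND PROOFS =====

-- invariant of A's loop: with carry n < 3 leading 'a's, the loop returns -1 exactly when
-- the carry completes to a triple or 'aaa' occurs later, and otherwise the closed form
lemma solutionLoop_eq (l : List Char) (count : Int) (n : Nat) (hn : n ≤ 2) :
    solutionLoop l count (n : Int) =
      if (List.replicate (3 - n) 'a' <+: l) ∨ (['a','a','a'] <:+: l) then -1
      else count + 2 * l.length - 3 * (l.count 'a' : Int) + (2 - (n : Int)) := by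
  induction l generalizing count n with
  | nil =>
    have h3 : 3 - n ≠ 0 := by omega
    simp [solutionLoop, List.prefix_nil, List.replicate_eq_nil_iff, h3]
  | cons c rest ih =>
    by_cases hc : c = 'a'
    · subst hc
      by_cases h2 : n = 2
      · subst h2
        simp [solutionLoop]
      · have hn1 : n + 1 ≤ 2 := by omega
        have hstep : ((n : Int) + 1 = 3) = False := by
          simp; omega
        have : solutionLoop ('a' :: rest) count (n : Int)
            = solutionLoop rest count ((n + 1 : Nat) : Int) := by
          simp [solutionLoop, hstep]
        rw [this, ih count (n + 1) hn1]
        have hrep : List.replicate (3 - n) 'a' = 'a' :: List.replicate (3 - (n + 1)) 'a' := by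
          have : 3 - n = (3 - (n + 1)) + 1 := by omega
          rw [this, List.replicate_succ]
        have hcond : ((List.replicate (3 - (n + 1)) 'a' <+: rest) ∨ (['a','a','a'] <:+: rest))
            ↔ ((List.replicate (3 - n) 'a' <+: 'a' :: rest) ∨ (['a','a','a'] <:+: 'a' :: rest)) := by
          rw [hrep, List.cons_prefix_cons, List.infix_cons_iff, List.cons_prefix_cons]
          constructor
          · rintro (h | h)
            · exact Or.inl ⟨rfl, h⟩
            · exact Or.inr (Or.inr h)
          · rintro (⟨-, h⟩ | (⟨-, h⟩ | h))
            · exact Or.inl h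
            · -- ['a','a'] <+: rest gives replicate (3-(n+1)) 'a' <+: rest since 3-(n+1) ≤ 2
              left
              refine List.IsPrefix.trans ?_ h
              have h1 : 3 - (n + 1) = 1 ∨ 3 - (n + 1) = 2 := by omega
              rcases h1 with h1 | h1 <;> rw [h1] <;> simp [List.replicate_succ]
            · exact Or.inr h
        simp only [hcond]
        split
        · rfl
        · simp only [List.count_cons_self, List.length_cons]
          push_cast
          ring
    · have : solutionLoop (c :: rest) count (n : Int)
          = solutionLoop rest (count + (2 - (n : Int))) ((0 : Nat) : Int) := by
        simp [solutionLoop, hc]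
      rw [this, ih _ 0 (by omega)]
      have hnopre : ∀ m : Nat, ¬ (List.replicate (m + 1) 'a' <+: c :: rest) := by
        intro m h
        rw [List.replicate_succ, List.cons_prefix_cons] at h
        exact hc h.1.symm
      have hcond : ((List.replicate (3 - 0) 'a' <+: rest) ∨ (['a','a','a'] <:+: rest))
          ↔ ((List.replicate (3 - n) 'a' <+: c :: rest) ∨ (['a','a','a'] <:+: c :: rest)) := by
        rw [List.infix_cons_iff]
        constructor
        · rintro (h | h)
          · exact Or.inr (Or.inr (List.IsPrefix.isInfix h))
          · exact Or.inr (Or.inr h)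
        · rintro (h | h | h)
          · rw [show 3 - n = (3 - n - 1) + 1 from by omega] at h
            exact absurd h (hnopre _)
          · exact absurd ((List.cons_prefix_cons.mp h).1.symm) hc
          · exact Or.inr h
      simp only [hcond]
      split
      · rfl
      · have hcnt : (c :: rest).count 'a' = rest.count 'a' := by
          simp [hc]
        rw [hcnt]
        push_cast [List.length_cons]
        ring

-- ===== VERDICT (by name: the statement is the Claim_ definition above) =====
theorem solution_spec : Claim_equal_solution := by
  intro S _
  show solution S = solution_alt S
  unfold solution solution_alt
  have hmain := solutionLoop_eq S.toList 0 0 (by omega)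
  simp only [Nat.cast_zero, Nat.sub_zero] at hmain
  rw [hmain]
  have hin : PySem.Str.isIn "aaa" S = true ↔ (['a','a','a'] <:+: S.toList) := by
    simpa using PySem.Str.isIn_iff_infix (sub := "aaa") (s := S)
  by_cases h : ['a','a','a'] <:+: S.toList
  · rw [if_pos (Or.inr h), if_pos (hin.mpr h)]
  · have hpre : ¬ ((List.replicate 3 'a' <+: S.toList) ∨ (['a','a','a'] <:+: S.toList)) := by
      rintro (hp | hi)
      · exact h (List.IsPrefix.isInfix hp)
      · exact h hi
    rw [if_neg hpre, if_neg (fun hh => h (hin.mp hh))]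
    rw [PySem.List.foldl_beq_add_one]
    push_cast
    ring
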